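-- pv_equiv track=rewrite | github.com/dzbwhut/algerithm_newcoder2021 | 3.19 bag.py | dfs
-- ===== SOURCE A (Python) =====
-- def dfs(bs:list,w:int,p:int):
--     cnt=0
--     if w<=0:
--         return cnt
--
--     for i in range(p,len(bs)):
--         if bs[i]<=w:
--             cnt+=1
--             cnt+=dfs(bs,w-bs[i],i+1)
--         else:
--             break
--     if p==0:  cnt+=1 #  首次进入时，没选一物--总体积为0，也是一种选择
--
--     return cnt
-- ===== SOURCE B (Python) =====
-- def dfs(bs: list, w: int, p: int):
--     # Iterative re-implementation: explicit work stack instead of recursion.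
--     if w <= 0:
--         return 0
--     total = 1 if p == 0 else 0
--     stack = [(p, w)]
--     while stack:
--         i, rem = stack.pop()
--         if i < len(bs) and bs[i] <= rem:
--             total += 1
--             stack.append((i + 1, rem))            # keep scanning at this level
--             if rem - bs[i] > 0:
--                 stack.append((i + 1, rem - bs[i]))  # descend after picking bs[i]
--     return total
-- ===== Notes on version B (the rewrite author's own statement) =====
-- stated objective: alternative
-- what changed: A's recursion (nested for-loop calling dfs recursively) is replaced by a single iterative while-loop over an explicit work stack of (index, remaining-capacity) frames accumulating one running total.
-- outside the precondition, e.g. on dfs([2, 3], 5, -1): A returns 6, B returns 5; on dfs([2, 3], 5, -3): A raises IndexError, B raises IndexError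
import Mathlib
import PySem

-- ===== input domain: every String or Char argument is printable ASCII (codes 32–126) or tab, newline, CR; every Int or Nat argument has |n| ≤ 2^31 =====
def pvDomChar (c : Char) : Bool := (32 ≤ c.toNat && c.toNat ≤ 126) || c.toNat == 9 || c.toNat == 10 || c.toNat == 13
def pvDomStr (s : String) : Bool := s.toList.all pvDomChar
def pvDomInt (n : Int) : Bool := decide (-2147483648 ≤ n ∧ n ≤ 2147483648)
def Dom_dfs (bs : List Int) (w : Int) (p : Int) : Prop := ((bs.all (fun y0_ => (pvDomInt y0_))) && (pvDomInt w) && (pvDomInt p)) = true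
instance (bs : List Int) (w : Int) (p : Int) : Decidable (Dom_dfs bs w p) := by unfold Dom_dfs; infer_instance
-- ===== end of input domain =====

-- B replaces A's recursion by an iterative explicit work stack (same exponential search, different
-- control structure); return value only, no side effects in either program.

-- ===== PORT A =====
-- A's `for i in range(p,len(bs))` loop with `break` is `dfsALoop`; the recursive call to `dfs`
-- is `dfsRec`.  Indexing is via Nat (`p.toNat` at entry): exact for 0 ≤ p, which Pre_dfs ensures
-- whenever the loop is reached (for w ≤ 0 Python returns 0 before touching p).
mutual
def dfsALoop (bs : List Int) (w : Int) (i : Nat) : Int :=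
  if h : i < bs.length then
    if bs[i] ≤ w then 1 + dfsRec bs (w - bs[i]) ((i : Int) + 1) + dfsALoop bs w (i + 1)
    else 0
  else 0
termination_by ((bs.length - i, 0) : Nat ×ₗ Nat)
decreasing_by
  · apply Prod.Lex.left; simp; omega
  · apply Prod.Lex.left; omega
def dfsRec (bs : List Int) (w : Int) (p : Int) : Int :=
  if w ≤ 0 then 0
  else dfsALoop bs w p.toNat + (if p = 0 then 1 else 0)
termination_by ((bs.length - p.toNat, 1) : Nat ×ₗ Nat)
decreasing_by
  · apply Prod.Lex.right; omega
end

def dfs (bs : List Int) (w : Int) (p : Int) : Int := dfsRec bs w p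

-- ===== PORT B =====
-- Source B's while loop over the explicit stack; the stack head is Python's list end (pop/append).
def dfsBLoop (bs : List Int) (stack : List (Nat × Int)) (total : Int) : Int :=
  match stack with
  | [] => total
  | (i, rem) :: rest =>
    if h : i < bs.length then
      if bs[i] ≤ rem then
        if 0 < rem - bs[i] then
          dfsBLoop bs ((i + 1, rem - bs[i]) :: (i + 1, rem) :: rest) (total + 1)
        else
          dfsBLoop bs ((i + 1, rem) :: rest) (total + 1)
      else dfsBLoop bs rest total
    else dfsBLoop bs rest total
termination_by (stack.map (fun e => 3 ^ (bs.length + 1 - e.1))).sum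
decreasing_by
  all_goals simp only [List.map_cons, List.sum_cons]
  all_goals have hp : 0 < 3 ^ (bs.length + 1 - i) := by positivity
  · have e1 : bs.length + 1 - i = (bs.length - i) + 1 := by omega
    have e2 : bs.length + 1 - (i + 1) = bs.length - i := by omega
    have hq : 0 < 3 ^ (bs.length - i) := by positivity
    rw [e1, e2, pow_succ]
    omega
  · have e1 : bs.length + 1 - i = (bs.length - i) + 1 := by omega
    have e2 : bs.length + 1 - (i + 1) = bs.length - i := by omega
    have hq : 0 < 3 ^ (bs.length - i) := by positivity
    rw [e1, e2, pow_succ]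
    omega
  · omega
  · omega

def dfs_alt (bs : List Int) (w : Int) (p : Int) : Int :=
  if w ≤ 0 then 0
  else dfsBLoop bs [(p.toNat, w)] (if p = 0 then 1 else 0)

-- ===== PRECONDITION & SPEC =====
-- Pre_ excludes a negative start index p together with positive w (outside the function's natural
-- domain): there Python A either raises IndexError (p < -len(bs)) or returns an accidental value
-- produced by negative-index wraparound.
def Pre_dfs (bs : List Int) (w : Int) (p : Int) : Prop := 0 ≤ p ∨ w ≤ 0
instance (bs : List Int) (w : Int) (p : Int) : Decidable (Pre_dfs bs w p) := by unfold Pre_dfs; infer_instance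
def pvWitness_dfs : List Int × Int × Int := ([1, 2, 3], 4, 0)

def Spec_dfs (bs : List Int) (w : Int) (p : Int) (out : Int) : Prop := out = dfs_alt bs w p
instance (bs : List Int) (w : Int) (p : Int) (out : Int) : Decidable (Spec_dfs bs w p out) := by unfold Spec_dfs; infer_instance

-- ===== CLAIM (what is proved, stated in full; the proofs are below) =====
def Claim_equal_dfs : Prop := ∀ (bs : List Int) (w : Int) (p : Int), Dom_dfs bs w p → Pre_dfs bs w p → Spec_dfs bs w p (dfs bs w p)

-- ===== LEMMAS AND PROOFS =====

-- The stack loop adds, to `total`, the A-loop value of every pending frame.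
theorem dfsBLoop_eq (bs : List Int) (stack : List (Nat × Int)) (total : Int) :
    dfsBLoop bs stack total = total + (stack.map (fun e => dfsALoop bs e.2 e.1)).sum := by
  fun_induction dfsBLoop bs stack total with
  | case1 => simp
  | case2 total i rem rest h hle hpos ih =>
    rw [ih]
    have hA : dfsALoop bs rem i
        = 1 + dfsRec bs (rem - bs[i]) (i + 1 : Nat) + dfsALoop bs rem (i + 1) := by
      rw [dfsALoop]; simp [h, hle]
    have hR : dfsRec bs (rem - bs[i]) (i + 1 : Nat)
        = dfsALoop bs (rem - bs[i]) (i + 1) := by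
      rw [dfsRec]
      have : ¬ (rem - bs[i] ≤ 0) := by omega
      simp [this]
      omega
    simp only [List.map_cons, List.sum_cons, hA, hR]
    ring
  | case3 total i rem rest h hle hpos ih =>
    rw [ih]
    have hA : dfsALoop bs rem i
        = 1 + dfsRec bs (rem - bs[i]) (i + 1 : Nat) + dfsALoop bs rem (i + 1) := by
      rw [dfsALoop]; simp [h, hle]
    have hR : dfsRec bs (rem - bs[i]) (i + 1 : Nat) = 0 := by
      rw [dfsRec]
      have : rem - bs[i] ≤ 0 := by omega
      simp [this]
    simp only [List.map_cons, List.sum_cons, hA, hR]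
    ring
  | case4 total i rem rest h hle ih =>
    rw [ih]
    have hA : dfsALoop bs rem i = 0 := by rw [dfsALoop]; simp [h, hle]
    simp [hA]
  | case5 total i rem rest h ih =>
    rw [ih]
    have hA : dfsALoop bs rem i = 0 := by rw [dfsALoop]; simp [h]
    simp [hA]

-- ===== VERDICT (by name: the statement is the Claim_ definition above) =====
theorem dfs_spec : Claim_equal_dfs := by
  intro bs w p _ _
  unfold Spec_dfs dfs dfs_alt
  rw [dfsRec]
  by_cases hw : w ≤ 0
  · simp [hw]
  · simp only [hw, dfsBLoop_eq]
    simp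
    ring
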